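-- pv_equiv track=rewrite | github.com/Dr0x3525/Proyecto-final-programacion | ejercicios_parciales/ejercicio_parcial_2/ejercicio1.py | encontrar_el_segundo_fib
-- ===== SOURCE A (Python) =====
-- def comprobar_ser_fibbonaci(numero):
--     numero = int(numero)
--     f1 = 0
--     f2 = 1
--     while f1 <= numero:
--         if f1 == numero:
--             return True
--         temp =  f1
--         f1 = f2
--         f2 = f1 + temp
--     return False
--
-- def encontrar_el_segundo_fib(vector):
--     indice = 0
--     contador_fibonacci = 0
--     for numero in vector:
--         if comprobar_ser_fibbonaci(numero):
--             if contador_fibonacci == 0: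
--                 contador_fibonacci = 1
--             else:
--                 return indice+1
--         indice += 1
--     return None
-- ===== SOURCE B (Python) =====
-- def comprobar_ser_fibbonaci(numero):
--     numero = int(numero)
--     f1 = 0
--     f2 = 1
--     while f1 <= numero:
--         if f1 == numero:
--             return True
--         temp = f1
--         f1 = f2
--         f2 = f1 + temp
--     return False
--
-- def encontrar_el_segundo_fib(vector):
--     indices = [i for i, n in enumerate(vector) if comprobar_ser_fibbonaci(n)]
--     return indices[1] + 1 if len(indices) >= 2 else None
-- ===== Notes on version B (the rewrite author's own statement) =====
-- stated objective: simpler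
-- what changed: Replaces the two-state counter scan with an early return by building the list of Fibonacci positions once (filtered enumerate) and selecting the second entry positionally.
import Mathlib
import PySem

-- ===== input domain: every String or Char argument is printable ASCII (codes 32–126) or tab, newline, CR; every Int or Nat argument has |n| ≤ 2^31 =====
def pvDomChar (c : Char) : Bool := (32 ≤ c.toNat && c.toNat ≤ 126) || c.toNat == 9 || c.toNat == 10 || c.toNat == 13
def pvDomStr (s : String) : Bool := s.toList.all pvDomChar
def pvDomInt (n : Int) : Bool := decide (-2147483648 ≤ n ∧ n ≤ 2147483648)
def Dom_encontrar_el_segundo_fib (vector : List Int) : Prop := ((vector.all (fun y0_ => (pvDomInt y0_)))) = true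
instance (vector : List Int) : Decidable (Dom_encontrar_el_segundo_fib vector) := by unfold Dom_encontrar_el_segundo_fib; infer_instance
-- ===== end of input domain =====

-- B replaces A's two-state counter scan with an early return by a filtered index table
-- (all Fibonacci positions collected once, second one selected); objective: simpler.

-- ===== PORT A =====
-- while f1 <= numero loop of comprobar_ser_fibbonaci; fuel only makes the loop total
-- (f1 exceeds numero within numero+2 iterations, so (numero+3).toNat fuel never runs out).
def fibLoop (numero f1 f2 : Int) : Nat → Bool
  | 0 => false
  | fuel + 1 =>
    if f1 ≤ numero then
      if f1 = numero then true
      else fibLoop numero f2 (f2 + f1) fuel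
    else false

def comprobar_ser_fibbonaci (numero : Int) : Bool :=
  fibLoop numero 0 1 (numero + 3).toNat

def encALoop : List Int → Int → Int → Option Int
  | [], _, _ => none
  | numero :: rest, indice, contador =>
    if comprobar_ser_fibbonaci numero then
      if contador = 0 then encALoop rest (indice + 1) 1
      else some (indice + 1)
    else encALoop rest (indice + 1) contador

def encontrar_el_segundo_fib (vector : List Int) : Option Int :=
  encALoop vector 0 0

-- ===== PORT B =====
def encontrar_el_segundo_fib_alt (vector : List Int) : Option Int :=
  let indices := ((PySem.List.enumerate vector).filter
      (fun p => comprobar_ser_fibbonaci p.2)).map Prod.fst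
  if 2 ≤ indices.length then (PySem.List.pyGet? indices 1).map (fun j => j + 1)
  else none

-- ===== PRECONDITION & SPEC =====
def Spec_encontrar_el_segundo_fib (vector : List Int) (out : Option Int) : Prop := out = encontrar_el_segundo_fib_alt vector
instance (vector : List Int) (out : Option Int) : Decidable (Spec_encontrar_el_segundo_fib vector out) := by unfold Spec_encontrar_el_segundo_fib; infer_instance

-- ===== CLAIM (what is proved, stated in full; the proofs are below) =====
def Claim_equal_encontrar_el_segundo_fib : Prop := ∀ (vector : List Int), Dom_encontrar_el_segundo_fib vector → Spec_encontrar_el_segundo_fib vector (encontrar_el_segundo_fib vector)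

-- ===== LEMMAS AND PROOFS =====

-- A's scan, characterised by the filtered index list B builds.
theorem encALoop_eq (l : List Int) : ∀ (s : Int),
    (encALoop l s 0 =
      (match ((PySem.List.enumerate l s).filter
          (fun p => comprobar_ser_fibbonaci p.2)).map Prod.fst with
        | _ :: j :: _ => some (j + 1)
        | _ => none))
    ∧ (encALoop l s 1 =
      (match ((PySem.List.enumerate l s).filter
          (fun p => comprobar_ser_fibbonaci p.2)).map Prod.fst with
        | j :: _ => some (j + 1)
        | _ => none)) := by
  induction l with
  | nil => intro s; simp [encALoop, PySem.List.enumerate_nil]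
  | cons n rest ih =>
    intro s
    rw [PySem.List.enumerate_cons]
    by_cases h : comprobar_ser_fibbonaci n = true
    · simp only [List.filter_cons, h, if_true, List.map_cons]
      refine ⟨?_, ?_⟩
      · rw [show encALoop (n :: rest) s 0 = encALoop rest (s + 1) 1 by simp [encALoop, h]]
        rw [(ih (s + 1)).2]
        cases List.map Prod.fst (List.filter (fun p => comprobar_ser_fibbonaci p.2)
          (PySem.List.enumerate rest (s + 1))) <;> rfl
      · simp [encALoop, h]
    · simp [encALoop, h, (ih (s + 1)).1, (ih (s + 1)).2]

-- ===== VERDICT (by name: the statement is the Claim_ definition above) =====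
theorem encontrar_el_segundo_fib_spec : Claim_equal_encontrar_el_segundo_fib := by
  intro vector _
  unfold Spec_encontrar_el_segundo_fib encontrar_el_segundo_fib encontrar_el_segundo_fib_alt
  rw [(encALoop_eq vector 0).1]
  cases h : ((PySem.List.enumerate vector 0).filter
      (fun p => comprobar_ser_fibbonaci p.2)).map Prod.fst with
  | nil => simp
  | cons x t =>
    cases t with
    | nil => simp
    | cons y t' =>
simp [PySem.List.pyGet?, PySem.List.pyIdx?]
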